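-- pv_equiv track=rewrite | github.com/Trustworthy-Engineered-Autonomy-Lab/cps-abstraction-tutorial | cegar/cegar_loop.py | _expand_lasso
-- ===== SOURCE A (Python) =====
-- from typing import List, Optional, Set, Tuple
--
-- def _expand_lasso(prefix: List[int], cycle: List[int], target_len: int) -> List[int]:
--     """Expand (prefix, cycle) into a finite uid sequence of length target_len."""
--     if not prefix and not cycle:
--         return []
--
--     seq = list(prefix)
--     if not cycle:
--         return seq[:target_len]
--
--     while len(seq) < target_len:
--         for u in cycle:
--             seq.append(u)
--             if len(seq) >= target_len:
--                 break
--     return seq[:target_len]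
-- ===== SOURCE B (Python) =====
-- def _expand_lasso(prefix, cycle, target_len):
--     """Closed-form: repeat the cycle a computed number of times, then slice."""
--     if not cycle:
--         return prefix[:target_len]
--     k = max(0, -((len(prefix) - target_len) // len(cycle)))
--     return (prefix + cycle * k)[:target_len]
-- ===== Notes on version B (the rewrite author's own statement) =====
-- stated objective: simpler
-- what changed: Replaces the element-by-element while/for append loop with a closed-form repetition count (ceiling division) followed by a single list repetition and slice.
import Mathlib
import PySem

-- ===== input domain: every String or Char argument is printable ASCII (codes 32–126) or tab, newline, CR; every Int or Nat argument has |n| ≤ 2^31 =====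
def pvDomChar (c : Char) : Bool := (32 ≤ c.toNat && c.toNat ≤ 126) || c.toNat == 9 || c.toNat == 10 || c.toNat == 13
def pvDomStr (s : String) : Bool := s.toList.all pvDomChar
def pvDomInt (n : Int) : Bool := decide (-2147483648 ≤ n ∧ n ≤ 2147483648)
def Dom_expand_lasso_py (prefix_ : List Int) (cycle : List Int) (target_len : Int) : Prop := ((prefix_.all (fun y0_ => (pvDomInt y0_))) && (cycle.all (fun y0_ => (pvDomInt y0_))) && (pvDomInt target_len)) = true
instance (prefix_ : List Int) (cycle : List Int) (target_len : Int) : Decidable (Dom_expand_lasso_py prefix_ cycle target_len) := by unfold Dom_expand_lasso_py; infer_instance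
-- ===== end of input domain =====

-- ===== PORT A =====
-- B changes: closed-form repetition count + one slice instead of the append loop (objective: simpler).
-- inner 'for u in cycle: seq.append(u); if len(seq) >= target_len: break'
def pvInner (target : Int) : List Int → List Int → List Int
  | [], seq => seq
  | u :: rest, seq =>
    if target ≤ ((seq ++ [u]).length : Int) then seq ++ [u] else pvInner target rest (seq ++ [u])

-- cited by pvWhile's decreasing_by
theorem pvInner_len_lt (target : Int) : ∀ (cycle seq : List Int), cycle ≠ [] →
    seq.length < (pvInner target cycle seq).length
  | [], _, h => absurd rfl h
  | u :: rest, seq, _ => by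
    unfold pvInner
    split
    · simp
    · rcases rest with _ | ⟨v, rest'⟩
      · simp [pvInner]
      · have := pvInner_len_lt target (v :: rest') (seq ++ [u]) (by simp)
        simp at this ⊢
        omega

-- outer 'while len(seq) < target_len' (the cycle ≠ [] conjunct is a totality guard:
-- A only enters the loop after returning early when cycle is empty)
def pvWhile (cycle : List Int) (target : Int) (seq : List Int) : List Int :=
  if h : cycle ≠ [] ∧ (seq.length : Int) < target then
    pvWhile cycle target (pvInner target cycle seq)
  else seq
termination_by (target - (seq.length : Int)).toNat
decreasing_by
  have := pvInner_len_lt target cycle seq h.1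
  omega

def expand_lasso_py (prefix_ : List Int) (cycle : List Int) (target_len : Int) : List Int :=
  if prefix_ = [] ∧ cycle = [] then []
  else
    let seq := prefix_
    if cycle = [] then PySem.List.slice seq none (some target_len)
    else PySem.List.slice (pvWhile cycle target_len seq) none (some target_len)

-- ===== PORT B =====
def expand_lasso_py_alt (prefix_ : List Int) (cycle : List Int) (target_len : Int) : List Int :=
  if cycle = [] then PySem.List.slice prefix_ none (some target_len)
  else
    let k : Int := max 0 (-(PySem.Int.floordiv ((prefix_.length : Int) - target_len) (cycle.length : Int)))
    PySem.List.slice (prefix_ ++ (List.replicate k.toNat cycle).flatten) none (some target_len)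

-- ===== PRECONDITION & SPEC =====
def Spec_expand_lasso_py (prefix_ : List Int) (cycle : List Int) (target_len : Int) (out : List Int) : Prop := out = expand_lasso_py_alt prefix_ cycle target_len
instance (prefix_ : List Int) (cycle : List Int) (target_len : Int) (out : List Int) : Decidable (Spec_expand_lasso_py prefix_ cycle target_len out) := by unfold Spec_expand_lasso_py; infer_instance

-- ===== CLAIM (what is proved, stated in full; the proofs are below) =====
def Claim_equal_expand_lasso_py : Prop := ∀ (prefix_ : List Int) (cycle : List Int) (target_len : Int), Dom_expand_lasso_py prefix_ cycle target_len → Spec_expand_lasso_py prefix_ cycle target_len (expand_lasso_py prefix_ cycle target_len)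

-- ===== LEMMAS AND PROOFS =====


theorem innerSpec (t : Int) : ∀ (cycle seq : List Int), cycle ≠ [] → (seq.length : Int) < t →
    ∃ j, 0 < j ∧ j ≤ cycle.length ∧
      pvInner t cycle seq = seq ++ cycle.take j ∧
      (t ≤ ((seq.length : Int) + j) ∨ j = cycle.length)
  | [], _, h, _ => absurd rfl h
  | u :: rest, seq, _, hlt => by
    by_cases hb : t ≤ ((seq ++ [u]).length : Int)
    · refine ⟨1, by omega, by simp, by rw [pvInner, if_pos hb]; simp, Or.inl (by simp at hb ⊢; omega)⟩
    · rcases rest with _ | ⟨v, rest'⟩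
      · exact ⟨1, by omega, by simp, by rw [pvInner, if_neg hb]; simp [pvInner], Or.inr (by simp)⟩
      · rw [pvInner, if_neg hb]
        obtain ⟨j', hj0, hjle, heq, hdisj⟩ :=
          innerSpec t (v :: rest') (seq ++ [u]) (by simp) (by simp at hb ⊢; omega)
        refine ⟨j' + 1, by omega, by simpa using hjle, ?_, ?_⟩
        · simp only [heq, List.take_succ_cons, List.append_assoc, List.cons_append,
            List.nil_append]
        · rcases hdisj with h | h
          · exact Or.inl (by simp at h ⊢; omega)
          · exact Or.inr (by simp at h ⊢; omega)

theorem whileSpec (cycle : List Int) (t : Int) (hc : cycle ≠ []) : ∀ (seq : List Int),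
    ∃ n, pvWhile cycle t seq <+: seq ++ (List.replicate n cycle).flatten ∧
      (t ≤ ((pvWhile cycle t seq).length : Int) ∨
        (pvWhile cycle t seq = seq ∧ t ≤ (seq.length : Int))) := by
  intro seq
  induction seq using pvWhile.induct cycle t with
  | case2 seq h =>
    rw [pvWhile, dif_neg h]
    have h2 : t ≤ (seq.length : Int) := by
      by_contra hlt
      exact h ⟨hc, by omega⟩
    exact ⟨0, by simp, Or.inr ⟨rfl, h2⟩⟩
  | case1 seq h ih =>
    rw [pvWhile, dif_pos h]
    obtain ⟨j, hj0, hjle, heq, hdisj⟩ := innerSpec t cycle seq hc h.2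
    obtain ⟨n1, hpre, hlen⟩ := ih
    rcases hdisj with hbrk | hfull
    · -- break mid-cycle: the next while test fails immediately
      have hstop : pvWhile cycle t (pvInner t cycle seq) =
          pvInner t cycle seq := by
        rw [pvWhile, dif_neg]
        rintro ⟨-, hlt⟩
        rw [heq] at hlt
        simp [List.length_take, Nat.min_eq_left hjle] at hlt
        omega
      refine ⟨1, ?_, ?_⟩
      · rw [hstop, heq]
        exact ⟨cycle.drop j, by simp⟩
      · left
        rw [hstop, heq]
        simp [List.length_take, Nat.min_eq_left hjle]
        omega
    · -- full pass: seq grew by one whole cycle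
      have hfe : pvInner t cycle seq = seq ++ cycle := by
        rw [heq, hfull, List.take_length]
      refine ⟨n1 + 1, ?_, ?_⟩
      · rw [hfe] at hpre
        have : seq ++ cycle ++ (List.replicate n1 cycle).flatten =
            seq ++ (List.replicate (n1 + 1) cycle).flatten := by
          rw [Nat.add_comm, List.replicate_add, List.flatten_append]
          simp
        rw [hfe]
        rwa [this] at hpre
      · rcases hlen with h1 | ⟨h1, h2⟩
        · exact Or.inl h1
        · left
          rw [h1, hfe]
          rw [hfe] at h2
          exact h2

-- prefix-of-a-common-extension: both results are length-≥ t prefixes of prefix_ ++ cycle^N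
theorem take_of_prefix (R M : List Int) (t : Nat) (hp : R <+: M) (hl : t ≤ R.length) :
    R.take t = M.take t := by
  obtain ⟨r, rfl⟩ := hp
  exact (List.take_append_of_le_length hl).symm

theorem repPrefix (cycle : List Int) (m n : Nat) (h : m ≤ n) :
    (List.replicate m cycle).flatten <+: (List.replicate n cycle).flatten := by
  refine ⟨(List.replicate (n - m) cycle).flatten, ?_⟩
  rw [← List.flatten_append, ← List.replicate_add, Nat.add_sub_cancel' h]


-- ===== VERDICT (by name: the statement is the Claim_ definition above) =====

theorem expand_lasso_py_spec : Claim_equal_expand_lasso_py := by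
  intro prefix_ cycle t _
  unfold Spec_expand_lasso_py expand_lasso_py expand_lasso_py_alt
  by_cases hc : cycle = []
  · subst hc
    by_cases hp : prefix_ = []
    · subst hp; simp [PySem.List.slice]
    · simp [hp]
  · simp only [if_neg hc, if_neg (by tauto : ¬(prefix_ = [] ∧ cycle = []))]
    have hcpos : (0 : Int) < (cycle.length : Int) := by
      have : cycle.length ≠ 0 := fun h => hc (List.eq_nil_of_length_eq_zero h)
      omega
    set p : Int := (prefix_.length : Int) with hp
    set c : Int := (cycle.length : Int) with hcdef
    by_cases ht : t ≤ p
    · -- loop never runs; k = 0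
      have hw : pvWhile cycle t prefix_ = prefix_ := by
        rw [pvWhile, dif_neg]; rintro ⟨-, h⟩; omega
      have hk : max 0 (-(PySem.Int.floordiv (p - t) c)) = 0 := by
        have h1 : 0 ≤ PySem.Int.floordiv (p - t) c := by
          rw [PySem.Int.floordiv_eq_ediv_of_pos hcpos]
          exact Int.ediv_nonneg (by omega) (by omega)
        omega
      rw [hw, hk]
      simp
    · -- loop runs; both sides are take t.toNat of prefix_ ++ cycle^N
      have ht' : p < t := by omega
      have ht0 : 0 ≤ t := by omega
      set k : Int := max 0 (-(PySem.Int.floordiv (p - t) c)) with hkdef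
      have hkceil : t - p ≤ k * c := by
        have hq : -(PySem.Int.floordiv (-(t - p)) c) = -(PySem.Int.floordiv (p - t) c) := by
          norm_num
        have := (PySem.Int.neg_floordiv_neg_eq_iff_of_pos (a := t - p)
          (b := c) (q := -(PySem.Int.floordiv (p - t) c)) hcpos).mp hq
        have hkge : -(PySem.Int.floordiv (p - t) c) ≤ k := le_max_right _ _
        nlinarith [this.2, hkge, hcpos]
      obtain ⟨n, hpre, hlen⟩ := whileSpec cycle t hc prefix_
      have hRlen : t ≤ ((pvWhile cycle t prefix_).length : Int) := by
        rcases hlen with h | ⟨h1, h2⟩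
        · exact h
        · omega
      set N : Nat := max n k.toNat with hN
      rw [PySem.List.slice_to _ ht0, PySem.List.slice_to _ ht0]
      have hA : (pvWhile cycle t prefix_).take t.toNat =
          (prefix_ ++ (List.replicate N cycle).flatten).take t.toNat := by
        apply take_of_prefix
        · refine hpre.trans ?_
          obtain ⟨r, hr⟩ := repPrefix cycle n N (le_max_left _ _)
          exact ⟨r, by rw [List.append_assoc, hr]⟩
        · omega
      have hB : (prefix_ ++ (List.replicate k.toNat cycle).flatten).take t.toNat =
          (prefix_ ++ (List.replicate N cycle).flatten).take t.toNat := by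
        apply take_of_prefix
        · obtain ⟨r, hr⟩ := repPrefix cycle k.toNat N (le_max_right _ _)
          exact ⟨r, by rw [List.append_assoc, hr]⟩
        · have hk0 : (0:Int) ≤ k := le_max_left _ _
          have h1 : (prefix_ ++ (List.replicate k.toNat cycle).flatten).length
              = prefix_.length + k.toNat * cycle.length := by
            simp
          have h2 : ((k.toNat * cycle.length : Nat) : Int) = k * c := by
            push_cast [Int.toNat_of_nonneg hk0]
            rfl
          rw [h1]
          omega
      rw [hA, hB]
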